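-- pv_equiv track=rewrite | github.com/zufuliu/misc-utils | MonitorInfo.py | DecodePNPID
-- ===== SOURCE A (Python) =====
-- def DecodePNPID(value):
-- 	result = []
-- 	start = ord('A') - 1
-- 	for i in range(3):
-- 		bit = value & 0x1f
-- 		value >>= 5
-- 		result.append(chr(start + bit))
-- 	return ''.join(reversed(result))
-- ===== SOURCE B (Python) =====
-- _PNP_LETTERS = "@ABCDEFGHIJKLMNOPQRSTUVWXYZ[\\]^_"
--
-- def DecodePNPID(value):
-- 	hi, rest = divmod(value & 0x7fff, 0x400)
-- 	mid, lo = divmod(rest, 0x20)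
-- 	return _PNP_LETTERS[hi] + _PNP_LETTERS[mid] + _PNP_LETTERS[lo]
-- ===== Notes on version B (the rewrite author's own statement) =====
-- stated objective: alternative
-- what changed: Replaces the shift-mask-append-reverse loop by a single 15-bit mask followed by two divmod steps and indexing into a precomputed 32-letter lookup string, with no loop, no per-character shifting of value and no reversal.
import Mathlib
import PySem

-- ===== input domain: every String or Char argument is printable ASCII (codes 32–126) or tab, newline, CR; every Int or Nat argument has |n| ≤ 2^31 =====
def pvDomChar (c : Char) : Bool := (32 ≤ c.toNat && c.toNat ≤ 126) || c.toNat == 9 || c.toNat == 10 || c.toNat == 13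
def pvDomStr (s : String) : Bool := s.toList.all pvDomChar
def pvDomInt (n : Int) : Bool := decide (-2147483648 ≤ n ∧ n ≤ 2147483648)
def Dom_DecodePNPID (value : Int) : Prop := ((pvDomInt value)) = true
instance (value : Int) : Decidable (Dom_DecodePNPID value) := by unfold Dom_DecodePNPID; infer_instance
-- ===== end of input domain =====

-- B masks once to 15 bits, splits with two divmods and reads the letters from a
-- precomputed lookup string, removing A's loop, in-place shifting and reversal.

-- ===== PORT A =====
-- for i in range(3): bit = value & 0x1f; value >>= 5; result.append(chr(start + bit)); return ''.join(reversed(result))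
def DecodePNPID (value : Int) : String :=
  let start : Int := 64  -- ord('A') - 1
  let st := (PySem.List.pyRange 0 3 1).foldl
    (fun (st : List Char × Int) _ =>
      let bit := PySem.Int.band st.2 31
      let v := st.2 >>> (5 : Nat)
      (st.1 ++ [Char.ofNat (start + bit).toNat], v))
    ([], value)
  String.ofList st.1.reverse

-- ===== PORT B =====
-- _PNP_LETTERS = "@ABCDEFGHIJKLMNOPQRSTUVWXYZ[\]^_"
def pvPNPLetters : List Char := "@ABCDEFGHIJKLMNOPQRSTUVWXYZ[\\]^_".toList

-- hi, rest = divmod(value & 0x7fff, 0x400); mid, lo = divmod(rest, 0x20)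
-- return _PNP_LETTERS[hi] + _PNP_LETTERS[mid] + _PNP_LETTERS[lo]
-- (the three indices are provably in 0..31, so Python's s[i] never raises here and
--  PySem.List.pyGetD is exact for it)
def DecodePNPID_alt (value : Int) : String :=
  let n := PySem.Int.band value 32767
  let hi := PySem.Int.floordiv n 1024
  let rest := PySem.Int.mod n 1024
  let mid := PySem.Int.floordiv rest 32
  let lo := PySem.Int.mod rest 32
  String.ofList [PySem.List.pyGetD pvPNPLetters hi ' ',
                 PySem.List.pyGetD pvPNPLetters mid ' ',
                 PySem.List.pyGetD pvPNPLetters lo ' ']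

-- ===== PRECONDITION & SPEC =====
def Spec_DecodePNPID (value : Int) (out : String) : Prop := out = DecodePNPID_alt value
instance (value : Int) (out : String) : Decidable (Spec_DecodePNPID value out) := by unfold Spec_DecodePNPID; infer_instance

-- ===== CLAIM =====
def Claim_equal_DecodePNPID : Prop := ∀ (value : Int), Dom_DecodePNPID value → Spec_DecodePNPID value (DecodePNPID value)

-- ===== LEMMAS AND PROOFS =====

-- Python's v & 31 is v mod 32 (mathematical mod), for every integer v.
theorem pv_band31 (v : Int) : PySem.Int.band v 31 = v % 32 := by
  unfold PySem.Int.band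
  have h31 : (31 : Int).toNat = 31 := rfl
  by_cases h : 0 ≤ v
  · rw [if_pos h, if_pos (by norm_num : (0:Int) ≤ 31), h31,
      show v.toNat &&& 31 = v.toNat % 32 from Nat.and_two_pow_sub_one_eq_mod v.toNat 5]
    omega
  · rw [if_neg h, if_pos (by norm_num : (0:Int) ≤ 31), h31,
      show 31 &&& (-v - 1).toNat = (-v - 1).toNat % 32 from by
        rw [Nat.and_comm]; exact Nat.and_two_pow_sub_one_eq_mod (-v - 1).toNat 5]
    omega

-- Python's v & 32767 is v mod 32768, for every integer v.
theorem pv_band32767 (v : Int) : PySem.Int.band v 32767 = v % 32768 := by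
  unfold PySem.Int.band
  have h15 : (32767 : Int).toNat = 32767 := rfl
  by_cases h : 0 ≤ v
  · rw [if_pos h, if_pos (by norm_num : (0:Int) ≤ 32767), h15,
      show v.toNat &&& 32767 = v.toNat % 32768 from Nat.and_two_pow_sub_one_eq_mod v.toNat 15]
    omega
  · rw [if_neg h, if_pos (by norm_num : (0:Int) ≤ 32767), h15,
      show 32767 &&& (-v - 1).toNat = (-v - 1).toNat % 32768 from by
        rw [Nat.and_comm]; exact Nat.and_two_pow_sub_one_eq_mod (-v - 1).toNat 15]
    omega

theorem pv_shr5 (v : Int) : v >>> (5 : Nat) = v / 32 := by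
  rw [Int.shiftRight_eq_div_pow]; norm_num

-- the lookup string holds chr(64+i) at index i, for every i < 32
theorem pv_tab_nat : ∀ n < 32, pvPNPLetters.getD n ' ' = Char.ofNat (64 + n) := by decide

theorem pv_tab (i : Int) (h0 : 0 ≤ i) (h1 : i < 32) :
    PySem.List.pyGetD pvPNPLetters i ' ' = Char.ofNat (64 + i).toNat := by
  obtain ⟨n, rfl⟩ := Int.eq_ofNat_of_zero_le h0
  rw [PySem.List.pyGetD_natCast, pv_tab_nat n (by exact_mod_cast h1),
    show ((64 : Int) + n).toNat = 64 + n by omega]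

-- ===== VERDICT =====
theorem DecodePNPID_spec : Claim_equal_DecodePNPID := by
  intro value _
  unfold Spec_DecodePNPID DecodePNPID DecodePNPID_alt
  rw [show PySem.List.pyRange 0 3 1 = [0, 1, 2] from by decide]
  simp only [List.foldl, List.nil_append, List.cons_append, List.reverse_cons,
    List.reverse_nil]
  simp only [pv_band31, pv_shr5, pv_band32767]
  rw [PySem.Int.floordiv_eq_ediv_of_pos (by norm_num : (0:Int) < 1024),
    PySem.Int.mod_eq_emod_of_pos (by norm_num : (0:Int) < 1024),
    PySem.Int.floordiv_eq_ediv_of_pos (by norm_num : (0:Int) < 32),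
    PySem.Int.mod_eq_emod_of_pos (by norm_num : (0:Int) < 32)]
  rw [pv_tab _ (by omega) (by omega), pv_tab _ (by omega) (by omega),
    pv_tab _ (by omega) (by omega)]
  rw [show value % 32768 / 1024 = value / 32 / 32 % 32 from by omega,
    show value % 32768 % 1024 / 32 = value / 32 % 32 from by omega,
    show value % 32768 % 1024 % 32 = value % 32 from by omega]
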